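-- pv_equiv track=rewrite | github.com/Carbonferrous/Python | numbertheory.py | pythagTreeTraverse
-- ===== SOURCE A (Python) =====
-- def pythagTreeTraverse(traversal):
--     uad = {'u': lambda m, n: (2*m-n, m),
--            'a': lambda m, n: (2*m+n, m),
--            'd': lambda m, n: (m+2*n, n)}
--     uad['U'] = uad['u']
--     uad['A'] = uad['a']
--     uad['D'] = uad['d']
--     m, n = 2, 1
--     for t in traversal:
--         m, n = uad[t](m, n)
--     return (m**2-n**2, 2*m*n, m**2+n**2)
-- ===== SOURCE B (Python) =====
-- def pythagTreeTraverse(traversal):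
--     mats = {'u': (2, -1, 1, 0), 'a': (2, 1, 1, 0), 'd': (1, 2, 0, 1)}
--     mats['U'] = mats['u']
--     mats['A'] = mats['a']
--     mats['D'] = mats['d']
--     a, b, c, d = 1, 0, 0, 1
--     for t in traversal:
--         p, q, r, s = mats[t]
--         a, b, c, d = p*a + q*c, p*b + q*d, r*a + s*c, r*b + s*d
--     m, n = 2*a + b, 2*c + d
--     return (m*m - n*n, 2*m*n, m*m + n*n)
-- ===== Notes on version B (the rewrite author's own statement) =====
-- stated objective: alternative
-- what changed: B maintains an accumulated 2x2 integer transformation matrix (identity, left-multiplied by each step's matrix) and applies it to the initial vector (2,1) only once at the end, instead of updating the (m,n) pair per character.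
import Mathlib
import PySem

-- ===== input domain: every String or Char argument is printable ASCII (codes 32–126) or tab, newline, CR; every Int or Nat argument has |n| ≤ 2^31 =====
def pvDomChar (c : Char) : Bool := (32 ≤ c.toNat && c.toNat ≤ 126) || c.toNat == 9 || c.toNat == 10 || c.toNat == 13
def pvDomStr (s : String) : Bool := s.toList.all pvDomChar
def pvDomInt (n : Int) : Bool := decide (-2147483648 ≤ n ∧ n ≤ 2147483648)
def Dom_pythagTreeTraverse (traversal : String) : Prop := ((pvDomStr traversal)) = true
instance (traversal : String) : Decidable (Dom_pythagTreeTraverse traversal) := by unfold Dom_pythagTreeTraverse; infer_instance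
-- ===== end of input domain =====

-- B replaces A's per-character (m,n) pair update by an accumulated 2x2 integer matrix applied
-- once to the initial vector (2,1) at the end (objective: alternative decomposition, same cost).

-- ===== PORT A =====
-- one step of A's loop: the lambda chosen by the dict uad; invalid chars raise KeyError in
-- Python (excluded by Pre_), the port leaves the state unchanged there
def pvStepA (st : Int × Int) (t : Char) : Int × Int :=
  if t = 'u' ∨ t = 'U' then (2 * st.1 - st.2, st.1)
  else if t = 'a' ∨ t = 'A' then (2 * st.1 + st.2, st.1)
  else if t = 'd' ∨ t = 'D' then (st.1 + 2 * st.2, st.2)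
  else st

def pythagTreeTraverse (traversal : String) : Int × Int × Int :=
  let mn := traversal.toList.foldl pvStepA (2, 1)
  (mn.1 ^ 2 - mn.2 ^ 2, 2 * mn.1 * mn.2, mn.1 ^ 2 + mn.2 ^ 2)

-- ===== PORT B =====
-- the dict 'mats' of Source B; 'none' = KeyError in Python (excluded by Pre_)
def pvMat? (t : Char) : Option (Int × Int × Int × Int) :=
  if t = 'u' ∨ t = 'U' then some (2, -1, 1, 0)
  else if t = 'a' ∨ t = 'A' then some (2, 1, 1, 0)
  else if t = 'd' ∨ t = 'D' then some (1, 2, 0, 1)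
  else none

-- one step of B's loop: left-multiply the accumulated matrix by the character's matrix
def pvStepB (acc : Int × Int × Int × Int) (t : Char) : Int × Int × Int × Int :=
  match pvMat? t with
  | some (p, q, r, s) =>
      (p * acc.1 + q * acc.2.2.1, p * acc.2.1 + q * acc.2.2.2,
       r * acc.1 + s * acc.2.2.1, r * acc.2.1 + s * acc.2.2.2)
  | none => acc

def pythagTreeTraverse_alt (traversal : String) : Int × Int × Int :=
  let acc := traversal.toList.foldl pvStepB (1, 0, 0, 1)
  let m := 2 * acc.1 + acc.2.1
  let n := 2 * acc.2.2.1 + acc.2.2.2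
  (m * m - n * n, 2 * m * n, m * m + n * n)

-- ===== PRECONDITION & SPEC =====
-- Pre_ excludes exactly the strings containing a character other than the six dict keys u/a/d/U/A/D, on which the
-- Python A raises KeyError.
def Pre_pythagTreeTraverse (traversal : String) : Prop :=
  (traversal.toList.all (fun c => c = 'u' ∨ c = 'a' ∨ c = 'd' ∨ c = 'U' ∨ c = 'A' ∨ c = 'D')) = true
instance (traversal : String) : Decidable (Pre_pythagTreeTraverse traversal) := by
  unfold Pre_pythagTreeTraverse; infer_instance

def pvWitness_pythagTreeTraverse : String := "uad"

def Spec_pythagTreeTraverse (traversal : String) (out : Int × Int × Int) : Prop :=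
  out = pythagTreeTraverse_alt traversal
instance (traversal : String) (out : Int × Int × Int) : Decidable (Spec_pythagTreeTraverse traversal out) := by
  unfold Spec_pythagTreeTraverse; infer_instance

-- ===== CLAIM (what is proved, stated in full; the proofs are below) =====
def Claim_equal_pythagTreeTraverse : Prop := ∀ (traversal : String), Dom_pythagTreeTraverse traversal → Pre_pythagTreeTraverse traversal → Spec_pythagTreeTraverse traversal (pythagTreeTraverse traversal)

-- ===== LEMMAS AND PROOFS =====

-- apply a 2x2 matrix to a column vector
def pvApply (acc : Int × Int × Int × Int) (v : Int × Int) : Int × Int :=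
  (acc.1 * v.1 + acc.2.1 * v.2, acc.2.2.1 * v.1 + acc.2.2.2 * v.2)

theorem pvStep_comm (acc : Int × Int × Int × Int) (v : Int × Int) (t : Char) :
    pvApply (pvStepB acc t) v = pvStepA (pvApply acc v) t := by
  unfold pvStepA pvStepB pvMat? pvApply
  split_ifs <;> simp <;> ring_nf

theorem pvFold_comm (l : List Char) (acc : Int × Int × Int × Int) (v : Int × Int) :
    pvApply (l.foldl pvStepB acc) v = l.foldl pvStepA (pvApply acc v) := by
  induction l generalizing acc with
  | nil => rfl
  | cons t l ih => simp [List.foldl, ih, pvStep_comm]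

-- ===== VERDICT (by name: the statement is the Claim_ definition above) =====
theorem pythagTreeTraverse_spec : Claim_equal_pythagTreeTraverse := by
  intro s _ _
  unfold Spec_pythagTreeTraverse pythagTreeTraverse pythagTreeTraverse_alt
  have h := pvFold_comm s.toList (1, 0, 0, 1) (2, 1)
  simp only [pvApply] at h
  norm_num at h
  simp only []
  rw [← h]
  simp only [Prod.ext_iff]
  refine ⟨by ring, by ring, by ring⟩
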